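-- pv_equiv track=rewrite | github.com/ervip/data-science-python-certification-course | Assignments/01 Introduction to Data Science and Machine Learning using Python/Case Study/Question 04.py | dl_counter
-- ===== SOURCE A (Python) =====
-- def dl_counter(sentence):
--     """Counts the letters and digits in the given sentence.
--     Note: All the special characters including space will be counted in 'others' key.
--
--     Args:
--         sentence (str): Sentence for which you need to count digits and letters
--
--     Returns:
--         dict: Counts categorized as digits, letters, others in a dict
--     """
--
--     counts = dict(digits=0, letters=0, others=0)
--     for char in sentence:
--         if char.isdigit():
--             counts['digits'] += 1
--         elif char.isalpha():
--             counts['letters'] += 1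
--         else:
--             counts['others'] += 1
--     return counts
-- ===== SOURCE B (Python) =====
-- def dl_counter(sentence):
--     digits = sum(1 for c in sentence if c.isdigit())
--     letters = sum(1 for c in sentence if c.isalpha())
--     return {"digits": digits, "letters": letters,
--             "others": len(sentence) - digits - letters}
-- ===== Notes on version B (the rewrite author's own statement) =====
-- stated objective: idiomatic
-- what changed: Replaces the single classifying loop over a mutable dict with two independent count reductions (digits, letters) and computes the third count arithmetically as the length minus the other two.
import Mathlib
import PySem

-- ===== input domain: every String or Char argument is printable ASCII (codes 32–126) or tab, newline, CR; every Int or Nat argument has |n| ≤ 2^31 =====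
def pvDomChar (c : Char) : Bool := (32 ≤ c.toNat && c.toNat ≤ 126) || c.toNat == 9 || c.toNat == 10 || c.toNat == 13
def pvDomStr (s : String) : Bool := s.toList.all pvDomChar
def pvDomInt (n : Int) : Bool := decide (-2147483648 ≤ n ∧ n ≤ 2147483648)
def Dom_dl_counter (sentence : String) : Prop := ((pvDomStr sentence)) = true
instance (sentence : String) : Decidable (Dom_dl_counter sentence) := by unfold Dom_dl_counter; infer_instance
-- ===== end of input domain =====

-- B replaces A's single classifying loop with two independent counts plus an arithmetic
-- complement for the third count (objective: more idiomatic; same O(n) cost).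

-- ===== PORT A =====
-- A: one pass, classifying each char and incrementing the matching dict entry.
def dl_counter (sentence : String) : List (String × Int) :=
  let counts : PySem.Dict String Int :=
    PySem.Dict.ofList [("digits", 0), ("letters", 0), ("others", 0)]
  let counts := sentence.toList.foldl (fun d c =>
    if PySem.Chars.isdigit c then d.insert "digits" (d.getD "digits" 0 + 1)
    else if PySem.Chars.isalpha c then d.insert "letters" (d.getD "letters" 0 + 1)
    else d.insert "others" (d.getD "others" 0 + 1)) counts
  counts.items

-- ===== PORT B =====
-- B: two independent count reductions, the third count by subtraction.
def dl_counter_alt (sentence : String) : List (String × Int) :=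
  let cs := sentence.toList
  let digits : Int := (cs.countP (fun c => PySem.Chars.isdigit c) : Nat)
  let letters : Int := (cs.countP (fun c => PySem.Chars.isalpha c) : Nat)
  [("digits", digits), ("letters", letters),
   ("others", (cs.length : Int) - digits - letters)]

-- ===== PRECONDITION & SPEC =====
def Spec_dl_counter (sentence : String) (out : List (String × Int)) : Prop := out = dl_counter_alt sentence
instance (sentence : String) (out : List (String × Int)) : Decidable (Spec_dl_counter sentence out) := by unfold Spec_dl_counter; infer_instance

-- ===== CLAIM (what is proved, stated in full; the proofs are below) =====
def Claim_equal_dl_counter : Prop := ∀ (sentence : String), Dom_dl_counter sentence → Spec_dl_counter sentence (dl_counter sentence)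

-- ===== LEMMAS AND PROOFS =====

theorem pv_digit_not_alpha (c : Char) (h : PySem.Chars.isdigit c = true) :
    PySem.Chars.isalpha c = false := by
  have h0 : ('0').val.toNat = 48 := rfl
  have h9 : ('9').val.toNat = 57 := rfl
  have hA : ('A').val.toNat = 65 := rfl
  have hZ : ('Z').val.toNat = 90 := rfl
  have ha : ('a').val.toNat = 97 := rfl
  have hz : ('z').val.toNat = 122 := rfl
  simp only [PySem.Chars.isdigit, PySem.Chars.isalpha, PySem.Chars.isupper, PySem.Chars.islower,
    Bool.and_eq_true, decide_eq_true_eq, Bool.or_eq_false_iff, Bool.and_eq_false_iff,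
    decide_eq_false_iff_not, Char.le_def, UInt32.le_iff_toNat_le, h0, h9, hA, hZ, ha, hz] at *
  omega

-- the loop invariant of A's fold over the three-key dict
theorem pv_fold_inv (cs : List Char) (a b c : Int) :
    cs.foldl (fun d c =>
      if PySem.Chars.isdigit c then d.insert "digits" (d.getD "digits" 0 + 1)
      else if PySem.Chars.isalpha c then d.insert "letters" (d.getD "letters" 0 + 1)
      else d.insert "others" (d.getD "others" 0 + 1))
      (PySem.Dict.ofList [("digits", a), ("letters", b), ("others", c)]) =
    PySem.Dict.ofList
      [("digits", a + (cs.countP (fun x => PySem.Chars.isdigit x) : Nat)),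
       ("letters", b + (cs.countP (fun x => !PySem.Chars.isdigit x && PySem.Chars.isalpha x) : Nat)),
       ("others", c + (cs.countP (fun x => !PySem.Chars.isdigit x && !PySem.Chars.isalpha x) : Nat))] := by
  induction cs generalizing a b c with
  | nil => simp
  | cons x xs ih =>
    by_cases hd : PySem.Chars.isdigit x = true
    · have step : (PySem.Dict.ofList [("digits", a), ("letters", b), ("others", c)]).insert
          "digits" ((PySem.Dict.ofList [("digits", a), ("letters", b), ("others", c)]).getD "digits" 0 + 1) =
          PySem.Dict.ofList [("digits", a + 1), ("letters", b), ("others", c)] := rfl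
      rw [List.foldl_cons, if_pos hd, step, ih]
      apply congrArg
      simp only [List.countP_cons, hd, if_true, Bool.not_true, Bool.false_and,
        Bool.false_eq_true, if_false, Nat.add_zero]
      push_cast
      ring_nf
    · by_cases ha : PySem.Chars.isalpha x = true
      · have step : (PySem.Dict.ofList [("digits", a), ("letters", b), ("others", c)]).insert
            "letters" ((PySem.Dict.ofList [("digits", a), ("letters", b), ("others", c)]).getD "letters" 0 + 1) =
            PySem.Dict.ofList [("digits", a), ("letters", b + 1), ("others", c)] := rfl
        rw [List.foldl_cons, if_neg hd, if_pos ha, step, ih]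
        apply congrArg
        simp only [List.countP_cons, eq_false_of_ne_true hd, ha, Bool.false_eq_true, if_false,
          Bool.not_false, Bool.true_and, Bool.not_true, if_true, Nat.add_zero]
        push_cast
        ring_nf
      · have step : (PySem.Dict.ofList [("digits", a), ("letters", b), ("others", c)]).insert
            "others" ((PySem.Dict.ofList [("digits", a), ("letters", b), ("others", c)]).getD "others" 0 + 1) =
            PySem.Dict.ofList [("digits", a), ("letters", b), ("others", c + 1)] := rfl
        rw [List.foldl_cons, if_neg hd, if_neg ha, step, ih]
        apply congrArg
        simp only [List.countP_cons, eq_false_of_ne_true hd, eq_false_of_ne_true ha,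
          Bool.false_eq_true, if_false, Bool.not_false, Bool.true_and, Bool.and_self, if_true,
          Nat.add_zero]
        push_cast
        ring_nf

theorem pv_letters_eq (cs : List Char) :
    cs.countP (fun x => !PySem.Chars.isdigit x && PySem.Chars.isalpha x) =
    cs.countP (fun x => PySem.Chars.isalpha x) := by
  apply List.countP_congr
  intro x _
  by_cases hd : PySem.Chars.isdigit x = true
  · simp [hd, pv_digit_not_alpha x hd]
  · simp [eq_false_of_ne_true hd]

theorem pv_sum_counts (cs : List Char) :
    cs.countP (fun x => PySem.Chars.isdigit x) + cs.countP (fun x => PySem.Chars.isalpha x) +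
      cs.countP (fun x => !PySem.Chars.isdigit x && !PySem.Chars.isalpha x) = cs.length := by
  induction cs with
  | nil => simp
  | cons x xs ih =>
    by_cases hd : PySem.Chars.isdigit x = true
    · simp only [List.countP_cons, hd, pv_digit_not_alpha x hd, List.length_cons,
        Bool.not_true, Bool.false_and, Bool.false_eq_true, if_true, if_false, Nat.add_zero]
      omega
    · by_cases ha : PySem.Chars.isalpha x = true
      · simp only [List.countP_cons, eq_false_of_ne_true hd, ha, List.length_cons,
          Bool.not_false, Bool.true_and, Bool.not_true, Bool.false_eq_true, if_true, if_false,
          Nat.add_zero]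
        omega
      · simp only [List.countP_cons, eq_false_of_ne_true hd, eq_false_of_ne_true ha,
          List.length_cons, Bool.not_false, Bool.true_and, Bool.false_eq_true, Bool.and_self,
          if_true, if_false, Nat.add_zero]
        omega

-- ===== VERDICT (by name: the statement is the Claim_ definition above) =====
theorem dl_counter_spec : Claim_equal_dl_counter := by
  intro sentence _
  unfold Spec_dl_counter dl_counter dl_counter_alt
  simp only [pv_fold_inv, zero_add]
  have hsum := pv_sum_counts sentence.toList
  have hlet := pv_letters_eq sentence.toList
  have hitems : ∀ (u v w : Int),
      (PySem.Dict.ofList [("digits", u), ("letters", v), ("others", w)]).items =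
      [("digits", u), ("letters", v), ("others", w)] := fun _ _ _ => rfl
  rw [hitems, hlet]
  simp only [List.cons.injEq, Prod.mk.injEq, true_and, and_true]
  omega
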